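-- pv_equiv track=rewrite | github.com/saiashish06/Chatbot | yoyopizza.py | select_size
-- ===== SOURCE A (Python) =====
-- check_small=["small","s","smal","Small","S"]
--
-- check_lar=["large","L","l","Large"]
--
-- check_mid=["medium","Medium","M","m","med"]
--
-- def select_size(sentence):
--     for word in sentence.split():
--         if word.lower() in check_small:
--             return "Corn Veg"
--     for word in sentence.split():
--         if word.lower() in check_mid:
--             return "Cheese Veg"
--     for word in sentence.split():
--         if word.lower() in check_lar:
--             return "Chicken"
-- ===== SOURCE B (Python) =====
-- _SMALL = {"small", "s", "smal"}
-- _MID = {"medium", "m", "med"}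
-- _LARGE = {"large", "l"}
--
-- def select_size(sentence):
--     saw_medium = saw_large = False
--     for word in sentence.split():
--         w = word.lower()
--         if w in _SMALL:
--             return "Corn Veg"
--         saw_medium = saw_medium or w in _MID
--         saw_large = saw_large or w in _LARGE
--     if saw_medium:
--         return "Cheese Veg"
--     if saw_large:
--         return "Chicken"
-- ===== Notes on version B (the rewrite author's own statement) =====
-- stated objective: simpler
-- what changed: Replaced A's three full scans of sentence.split() (one per size class) by a single pass that lowercases each word once, returns immediately on a small keyword and records medium/large flags, resolving them after the loop to keep the small>medium>large priority.
import Mathlib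
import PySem

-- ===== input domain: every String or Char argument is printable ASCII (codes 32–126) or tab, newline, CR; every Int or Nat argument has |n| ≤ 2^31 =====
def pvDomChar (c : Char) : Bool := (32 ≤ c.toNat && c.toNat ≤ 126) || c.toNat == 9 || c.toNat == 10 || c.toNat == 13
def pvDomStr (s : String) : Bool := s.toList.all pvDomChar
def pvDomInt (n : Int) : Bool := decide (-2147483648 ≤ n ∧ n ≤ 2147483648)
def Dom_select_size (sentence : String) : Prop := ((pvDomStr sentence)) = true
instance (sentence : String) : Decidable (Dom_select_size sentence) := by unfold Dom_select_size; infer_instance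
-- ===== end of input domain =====

-- B replaces A's three separate scans of the word list by a single pass with deferred medium/large flags (objective: simpler).

-- ===== PORT A =====
def check_small : List String := ["small", "s", "smal", "Small", "S"]
def check_lar : List String := ["large", "L", "l", "Large"]
def check_mid : List String := ["medium", "Medium", "M", "m", "med"]

-- first for-loop of A: return "Corn Veg" at the first small keyword
def pvLoopSmall : List String → Option String
  | [] => none
  | w :: ws => if check_small.contains (PySem.Str.lower w) then some "Corn Veg" else pvLoopSmall ws

-- second for-loop of A
def pvLoopMid : List String → Option String
  | [] => none
  | w :: ws => if check_mid.contains (PySem.Str.lower w) then some "Cheese Veg" else pvLoopMid ws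

-- third for-loop of A
def pvLoopLar : List String → Option String
  | [] => none
  | w :: ws => if check_lar.contains (PySem.Str.lower w) then some "Chicken" else pvLoopLar ws

def select_size (sentence : String) : Option String :=
  match pvLoopSmall (PySem.Str.split₀ sentence) with
  | some r => some r
  | none =>
    match pvLoopMid (PySem.Str.split₀ sentence) with
    | some r => some r
    | none => pvLoopLar (PySem.Str.split₀ sentence)

-- ===== PORT B =====
def altSmall : List String := ["small", "s", "smal"]
def altMid : List String := ["medium", "m", "med"]
def altLarge : List String := ["large", "l"]

-- the single loop of B, carrying the saw_medium / saw_large flags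
def pvAltLoop : List String → Bool → Bool → Option String
  | [], sawMedium, sawLarge =>
      if sawMedium then some "Cheese Veg"
      else if sawLarge then some "Chicken"
      else none
  | word :: ws, sawMedium, sawLarge =>
      let w := PySem.Str.lower word
      if altSmall.contains w then some "Corn Veg"
      else pvAltLoop ws (sawMedium || altMid.contains w) (sawLarge || altLarge.contains w)

def select_size_alt (sentence : String) : Option String :=
  pvAltLoop (PySem.Str.split₀ sentence) false false

-- ===== PRECONDITION & SPEC =====
def Spec_select_size (sentence : String) (out : Option String) : Prop := out = select_size_alt sentence
instance (sentence : String) (out : Option String) : Decidable (Spec_select_size sentence out) := by unfold Spec_select_size; infer_instance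

-- ===== CLAIM (what is proved, stated in full; the proofs are below) =====
def Claim_equal_select_size : Prop := ∀ (sentence : String), Dom_select_size sentence → Spec_select_size sentence (select_size sentence)

-- ===== LEMMAS AND PROOFS =====

-- a lowered character is never an uppercase ASCII letter
theorem lowerChar_ne_upper (c d : Char) (hd : PySem.Chars.isupper d = true) :
    PySem.Chars.lowerChar c ≠ d := by
  have hA : ('A').val.toNat = 65 := rfl
  have hZ : ('Z').val.toNat = 90 := rfl
  unfold PySem.Chars.lowerChar PySem.Chars.isupper at *
  simp only [Bool.and_eq_true, decide_eq_true_eq, Char.le_def, UInt32.le_iff_toNat_le] at hd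
  split_ifs with h
  · simp only [Bool.and_eq_true, decide_eq_true_eq, Char.le_def, UInt32.le_iff_toNat_le] at h
    intro he
    have h2 := congrArg Char.toNat he
    rw [Char.toNat_ofNat] at h2
    have hv : (c.toNat + 32).isValidChar := Or.inl (by simp only [Char.toNat] at *; omega)
    rw [if_pos hv] at h2
    simp only [Char.toNat] at *
    omega
  · simp only [Bool.and_eq_true, decide_eq_true_eq, Char.le_def, UInt32.le_iff_toNat_le, not_and, not_le] at h
    intro he; subst he
    omega

-- a lowered string never equals a string whose first character is uppercase ASCII
theorem lower_ne_of_head_upper (w t : String) (c : Char)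
    (h1 : t.toList.head? = some c) (h2 : PySem.Chars.isupper c = true) :
    PySem.Str.lower w ≠ t := by
  intro he
  have h3 := congrArg String.toList he
  rw [PySem.Str.toList_lower] at h3
  unfold PySem.Chars.lower at h3
  have h4 : (w.toList.map PySem.Chars.lowerChar).head? = some c := by rw [h3, h1]
  rw [List.head?_map] at h4
  cases hw : w.toList.head? with
  | none => rw [hw] at h4; simp at h4
  | some a => rw [hw] at h4; simp at h4; exact lowerChar_ne_upper a c h2 h4

-- on lowered words, A's capitalised keyword lists test the same membership as B's sets
theorem contains_small_eq (w : String) :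
    check_small.contains (PySem.Str.lower w) = altSmall.contains (PySem.Str.lower w) := by
  have h1 : PySem.Str.lower w ≠ "Small" := lower_ne_of_head_upper _ _ 'S' rfl rfl
  have h2 : PySem.Str.lower w ≠ "S" := lower_ne_of_head_upper _ _ 'S' rfl rfl
  simp [check_small, altSmall, List.contains_eq_mem, List.mem_cons, h1, h2]

theorem contains_mid_eq (w : String) :
    check_mid.contains (PySem.Str.lower w) = altMid.contains (PySem.Str.lower w) := by
  have h1 : PySem.Str.lower w ≠ "Medium" := lower_ne_of_head_upper _ _ 'M' rfl rfl
  have h2 : PySem.Str.lower w ≠ "M" := lower_ne_of_head_upper _ _ 'M' rfl rfl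
  simp [check_mid, altMid, List.contains_eq_mem, List.mem_cons, h1, h2]

theorem contains_lar_eq (w : String) :
    check_lar.contains (PySem.Str.lower w) = altLarge.contains (PySem.Str.lower w) := by
  have h1 : PySem.Str.lower w ≠ "Large" := lower_ne_of_head_upper _ _ 'L' rfl rfl
  have h2 : PySem.Str.lower w ≠ "L" := lower_ne_of_head_upper _ _ 'L' rfl rfl
  simp [check_lar, altLarge, List.contains_eq_mem, List.mem_cons, h1, h2]

-- canonical predicates on the word list (in terms of B's sets)
def hasSmall (ws : List String) : Bool := ws.any (fun w => altSmall.contains (PySem.Str.lower w))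
def hasMid (ws : List String) : Bool := ws.any (fun w => altMid.contains (PySem.Str.lower w))
def hasLar (ws : List String) : Bool := ws.any (fun w => altLarge.contains (PySem.Str.lower w))

theorem loopSmall_eq (ws : List String) :
    pvLoopSmall ws = if hasSmall ws then some "Corn Veg" else none := by
  induction ws with
  | nil => rfl
  | cons w ws ih =>
    simp only [pvLoopSmall, contains_small_eq, ih, hasSmall, List.any_cons]
    by_cases h : altSmall.contains (PySem.Str.lower w) = true
    · rw [if_pos h, if_pos (by rw [h, Bool.true_or])]
    · have h' : altSmall.contains (PySem.Str.lower w) = false := (Bool.not_eq_true _).mp h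
      rw [if_neg h]
      simp only [h', Bool.false_or]
      all_goals rfl

theorem loopMid_eq (ws : List String) :
    pvLoopMid ws = if hasMid ws then some "Cheese Veg" else none := by
  induction ws with
  | nil => rfl
  | cons w ws ih =>
    simp only [pvLoopMid, contains_mid_eq, ih, hasMid, List.any_cons]
    by_cases h : altMid.contains (PySem.Str.lower w) = true
    · rw [if_pos h, if_pos (by rw [h, Bool.true_or])]
    · have h' : altMid.contains (PySem.Str.lower w) = false := (Bool.not_eq_true _).mp h
      rw [if_neg h]
      simp only [h', Bool.false_or]
      all_goals rfl

theorem loopLar_eq (ws : List String) :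
    pvLoopLar ws = if hasLar ws then some "Chicken" else none := by
  induction ws with
  | nil => rfl
  | cons w ws ih =>
    simp only [pvLoopLar, contains_lar_eq, ih, hasLar, List.any_cons]
    by_cases h : altLarge.contains (PySem.Str.lower w) = true
    · rw [if_pos h, if_pos (by rw [h, Bool.true_or])]
    · have h' : altLarge.contains (PySem.Str.lower w) = false := (Bool.not_eq_true _).mp h
      rw [if_neg h]
      simp only [h', Bool.false_or]
      all_goals rfl

theorem alt_eq (ws : List String) (sm sl : Bool) :
    pvAltLoop ws sm sl =
      if hasSmall ws then some "Corn Veg"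
      else if sm || hasMid ws then some "Cheese Veg"
      else if sl || hasLar ws then some "Chicken"
      else none := by
  induction ws generalizing sm sl with
  | nil => simp [pvAltLoop, hasSmall, hasMid, hasLar]
  | cons w ws ih =>
    simp only [pvAltLoop, hasSmall, hasMid, hasLar, List.any_cons]
    by_cases h : altSmall.contains (PySem.Str.lower w) = true
    · rw [if_pos h, if_pos (by rw [h, Bool.true_or])]
    · have h' : altSmall.contains (PySem.Str.lower w) = false := (Bool.not_eq_true _).mp h
      rw [if_neg h, ih]
      simp only [h', Bool.false_or, Bool.or_assoc, hasSmall, hasMid, hasLar]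
      all_goals rfl

-- ===== VERDICT (by name: the statement is the Claim_ definition above) =====
theorem select_size_spec : Claim_equal_select_size := by
  intro s _
  unfold Spec_select_size select_size select_size_alt
  rw [alt_eq, loopSmall_eq, loopMid_eq, loopLar_eq, Bool.false_or, Bool.false_or]
  by_cases h1 : hasSmall (PySem.Str.split₀ s) = true
  · rw [if_pos h1, if_pos h1]
  · rw [if_neg h1, if_neg h1]
    by_cases h2 : hasMid (PySem.Str.split₀ s) = true
    · rw [if_pos h2, if_pos h2]
    · rw [if_neg h2, if_neg h2]
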